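-- pv_equiv track=rewrite | github.com/sekaha/Freyagen | test2.py | compute_x_y
-- ===== SOURCE A (Python) =====
-- def compute_x_y(index):
--     n = 30  # The maximum value for the first integer (0 to 29)
--
--     if index < 0 or index >= n * (n - 1) // 2:
--         # Index out of range
--         return None
--
--     # Find the row and column in the triangular matrix
--     row = 0
--     col = 0
--     while index >= n - 1 - row:
--         index -= n - 1 - row
--         row += 1
--         col += 1
--
--     x = row
--     y = col + row + 1
--     return x, y
-- ===== SOURCE B (Python) =====
-- import math
--
-- def compute_x_y(index):
--     # Closed form: count j = 434 - index positions from the end; the rows seen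
--     # from the bottom have sizes 1,2,3,..., so the row-from-end is the
--     # triangular root of j, and the row is 28 minus that.
--     if index < 0 or index >= 435:  # 30*29//2
--         return None
--     j = 434 - index
--     r = 28 - (math.isqrt(8 * j + 1) - 1) // 2
--     return r, 2 * r + 1
-- ===== Notes on version B (the rewrite author's own statement) =====
-- stated objective: simpler
-- what changed: Replaces the row-by-row subtraction while-loop with a closed-form row computation: count positions from the end of the triangle and take an integer square root, so no loop at all.
import Mathlib
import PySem

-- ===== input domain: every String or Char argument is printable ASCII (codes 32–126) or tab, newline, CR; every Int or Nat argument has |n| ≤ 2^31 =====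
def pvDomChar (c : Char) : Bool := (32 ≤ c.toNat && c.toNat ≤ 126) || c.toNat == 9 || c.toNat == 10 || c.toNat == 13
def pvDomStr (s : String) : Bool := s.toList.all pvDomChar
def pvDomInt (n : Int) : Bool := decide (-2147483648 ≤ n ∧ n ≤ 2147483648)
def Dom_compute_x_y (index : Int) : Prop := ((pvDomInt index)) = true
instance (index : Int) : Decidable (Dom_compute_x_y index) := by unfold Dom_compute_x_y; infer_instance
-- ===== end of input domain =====

-- B replaces A's row-by-row subtraction loop with a closed-form integer-sqrt row computation (objective: simpler, O(1)).

-- ===== PORT A =====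
-- A's while loop; fuel (30 suffices, each iteration increments row by 1 and the guard
-- keeps index < 435) only makes the same computation total.
def computeLoopA : Nat → Int → Int → Int → Int × Int
  | 0, _, row, col => (row, col)
  | fuel + 1, index, row, col =>
    if index ≥ 30 - 1 - row then
      computeLoopA fuel (index - (30 - 1 - row)) (row + 1) (col + 1)
    else (row, col)

def compute_x_y (index : Int) : Option (Int × Int) :=
  if index < 0 ∨ index ≥ 30 * (30 - 1) / 2 then none
  else
    let (row, col) := computeLoopA 30 index 0 0
    some (row, col + row + 1)

-- ===== PORT B =====
-- port of math.isqrt for the bounded radicand used here: largest k ≤ fuel with k*k ≤ n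
def isqrtB : Nat → Nat → Nat
  | 0, _ => 0
  | f + 1, n => if (f + 1) * (f + 1) ≤ n then f + 1 else isqrtB f n

def compute_x_y_alt (index : Int) : Option (Int × Int) :=
  if index < 0 ∨ index ≥ 435 then none
  else
    let j : Int := 434 - index
    -- math.isqrt, exact here: 0 ≤ 8*j+1 ≤ 3473 < 59*59, so isqrtB 59 is its value
    let r : Int := 28 - PySem.Int.floordiv ((Int.ofNat (isqrtB 59 (8 * j + 1).toNat)) - 1) 2
    some (r, 2 * r + 1)

-- ===== PRECONDITION & SPEC =====
def Spec_compute_x_y (index : Int) (out : Option (Int × Int)) : Prop := out = compute_x_y_alt index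
instance (index : Int) (out : Option (Int × Int)) : Decidable (Spec_compute_x_y index out) := by unfold Spec_compute_x_y; infer_instance

-- ===== CLAIM (what is proved, stated in full; the proofs are below) =====
def Claim_equal_compute_x_y : Prop := ∀ (index : Int), Dom_compute_x_y index → Spec_compute_x_y index (compute_x_y index)

-- ===== LEMMAS AND PROOFS =====

set_option maxRecDepth 20000 in
set_option maxHeartbeats 2000000 in
theorem inrange_eq : ∀ k : Nat, k < 435 → compute_x_y (Int.ofNat k) = compute_x_y_alt (Int.ofNat k) := by decide

-- ===== VERDICT (by name: the statement is the Claim_ definition above) =====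
theorem compute_x_y_spec : Claim_equal_compute_x_y := by
  intro index _
  unfold Spec_compute_x_y
  by_cases h : index < 0 ∨ index ≥ 435
  · unfold compute_x_y compute_x_y_alt
    rw [if_pos (by omega), if_pos h]
  · simp only [not_or, not_lt, not_le] at h
    obtain ⟨h0, h1⟩ := h
    lift index to Nat using h0 with k
    exact inrange_eq k (by omega)
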